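-- pv_equiv track=rewrite | github.com/raeez/chiral-bar-cobar | compute/lib/verlinde_shadow_algebra.py | sl2_fusion_rules_explicit
-- ===== SOURCE A (Python) =====
-- from typing import Any, Dict, List, Optional, Tuple
--
-- def sl2_fusion_rules_explicit(k: int) -> Dict[Tuple[int, int, int], int]:
--     r"""Explicit nonzero fusion rules for sl_2 at level k.
--
--     For sl_2 at level k, the fusion rules are known exactly:
--         N_{ij}^m = 1 if |i-j| <= m <= min(i+j, 2k-i-j) and i+j+m even
--         N_{ij}^m = 0 otherwise
--
--     This is the truncated Clebsch-Gordan rule.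
--
--     Returns dict mapping (i, j, m) -> N_{ij}^m for nonzero entries.
--     """
--     size = k + 1
--     rules = {}
--     for i in range(size):
--         for j in range(size):
--             for m in range(size):
--                 if (abs(i - j) <= m <= min(i + j, 2 * k - i - j)
--                         and (i + j + m) % 2 == 0):
--                     rules[(i, j, m)] = 1
--     return rules
-- ===== SOURCE B (Python) =====
-- def sl2_fusion_rules_explicit(k: int):
--     # Direct generation: for each (i, j) emit the valid arithmetic progression of m.
--     return {
--         (i, j, m): 1
--         for i in range(k + 1)
--         for j in range(k + 1)
--         for m in range(abs(i - j), min(i + j, 2 * k - i - j) + 1, 2)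
--     }
-- ===== Notes on version B (the rewrite author's own statement) =====
-- stated objective: faster
-- what changed: B drops A's inner full scan over m with its interval-and-parity guard and instead directly generates the valid step-2 arithmetic progression of m inside a dict comprehension, relying on the lower bound sharing the upper bound's parity and the upper bound never exceeding k.
import Mathlib
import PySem

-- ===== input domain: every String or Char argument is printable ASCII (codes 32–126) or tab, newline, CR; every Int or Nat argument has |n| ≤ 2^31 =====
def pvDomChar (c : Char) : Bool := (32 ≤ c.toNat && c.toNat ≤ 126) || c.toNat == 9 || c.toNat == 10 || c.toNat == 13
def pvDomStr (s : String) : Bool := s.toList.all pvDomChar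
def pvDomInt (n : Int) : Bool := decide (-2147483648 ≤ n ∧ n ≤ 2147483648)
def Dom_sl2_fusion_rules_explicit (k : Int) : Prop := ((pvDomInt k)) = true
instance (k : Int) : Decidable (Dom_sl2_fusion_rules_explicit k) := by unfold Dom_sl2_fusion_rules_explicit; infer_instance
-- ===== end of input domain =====

-- B replaces A's inner full scan over m (with a membership/parity guard) by direct
-- generation of the valid step-2 arithmetic progression, via a dict comprehension.

-- ===== PORT A =====
def sl2_fusion_rules_explicit (k : Int) : List (Int × Int × Int × Int) :=
  let size := k + 1
  let rules : PySem.Dict (Int × Int × Int) Int :=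
    (PySem.List.pyRange 0 size 1).foldl (fun rules i =>
      (PySem.List.pyRange 0 size 1).foldl (fun rules j =>
        (PySem.List.pyRange 0 size 1).foldl (fun rules m =>
          if |i - j| ≤ m ∧ m ≤ min (i + j) (2 * k - i - j) ∧ PySem.Int.mod (i + j + m) 2 = 0
          then rules.insert (i, j, m) 1 else rules) rules) rules) PySem.Dict.empty
  rules.items.map (fun p => (p.1.1, p.1.2.1, p.1.2.2, p.2))

-- ===== PORT B =====
def sl2_fusion_rules_explicit_alt (k : Int) : List (Int × Int × Int × Int) :=
  (PySem.Dict.ofList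
    ((PySem.List.pyRange 0 (k + 1) 1).flatMap (fun i =>
      (PySem.List.pyRange 0 (k + 1) 1).flatMap (fun j =>
        (PySem.List.pyRange (|i - j|) (min (i + j) (2 * k - i - j) + 1) 2).map
          (fun m => ((i, j, m), (1 : Int))))))).items.map
    (fun p => (p.1.1, p.1.2.1, p.1.2.2, p.2))

-- ===== PRECONDITION & SPEC =====
def Spec_sl2_fusion_rules_explicit (k : Int) (out : List (Int × Int × Int × Int)) : Prop := out = sl2_fusion_rules_explicit_alt k
instance (k : Int) (out : List (Int × Int × Int × Int)) : Decidable (Spec_sl2_fusion_rules_explicit k out) := by unfold Spec_sl2_fusion_rules_explicit; infer_instance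

-- ===== CLAIM (what is proved, stated in full; the proofs are below) =====
def Claim_equal_sl2_fusion_rules_explicit : Prop := ∀ (k : Int), Dom_sl2_fusion_rules_explicit k → Spec_sl2_fusion_rules_explicit k (sl2_fusion_rules_explicit k)

-- ===== LEMMAS AND PROOFS =====

-- A guarded insert loop is the insert loop over the filtered, mapped pair list.
theorem pv_foldl_insert_if {α κ ν : Type} [BEq κ] (P : α → Prop) [DecidablePred P]
    (key : α → κ) (v : ν) (l : List α) (d : PySem.Dict κ ν) :
    l.foldl (fun d x => if P x then d.insert (key x) v else d) d
      = ((l.filter (fun x => decide (P x))).map (fun x => (key x, v))).foldl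
          (fun d p => d.insert p.1 p.2) d := by
  induction l generalizing d with
  | nil => rfl
  | cons x xs ih =>
    by_cases h : P x <;> simp [h, ih]

-- A fold whose body is itself a fold over g x is a fold over the flattened list.
theorem pv_foldl_foldl_flatMap {α β δ : Type} (g : α → List β) (f : δ → β → δ)
    (l : List α) (d : δ) :
    l.foldl (fun d x => (g x).foldl f d) d = (l.flatMap g).foldl f d := by
  induction l generalizing d with
  | nil => rfl
  | cons x xs ih => simp [List.flatMap_cons, List.foldl_append, ih]

theorem pv_ofList_eq_foldl {κ ν : Type} [BEq κ] (ps : List (κ × ν)) :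
    PySem.Dict.ofList ps = ps.foldl (fun d p => d.insert p.1 p.2) PySem.Dict.empty := rfl

-- Core: the filtered full scan over m is exactly the step-2 progression.
theorem pv_filter_eq_pyRange_two (k i j : Int) :
    (PySem.List.pyRange 0 (k + 1) 1).filter
      (fun m => decide (|i - j| ≤ m ∧ m ≤ min (i + j) (2 * k - i - j) ∧
        PySem.Int.mod (i + j + m) 2 = 0))
      = PySem.List.pyRange (|i - j|) (min (i + j) (2 * k - i - j) + 1) 2 := by
  have h2 : (0:Int) < 2 := by norm_num
  have hsl : (PySem.List.pyRange 0 (k + 1) 1).filter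
      (fun m => decide (|i - j| ≤ m ∧ m ≤ min (i + j) (2 * k - i - j) ∧
        PySem.Int.mod (i + j + m) 2 = 0)) |>.Pairwise (· < ·) :=
    List.Pairwise.filter _ (PySem.List.pairwise_lt_pyRange_one 0 (k+1))
  have hsr : (PySem.List.pyRange (|i - j|) (min (i + j) (2 * k - i - j) + 1) 2).Pairwise (· < ·) := by
    rw [PySem.List.pyRange_of_pos _ _ h2]
    exact (List.pairwise_lt_range).map _ (fun a b hab => by omega)
  refine List.Perm.eq_of_pairwise (fun a b _ _ h1 h2 => by omega) hsl hsr ?_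
  rw [List.perm_ext_iff_of_nodup hsl.nodup hsr.nodup]
  intro m
  rw [List.mem_filter, PySem.List.mem_pyRange_iff_of_pos h2,
    PySem.List.mem_pyRange_one, decide_eq_true_iff,
    PySem.Int.mod_eq_emod_of_pos h2]
  rcases abs_cases (i - j) with ⟨h1, _⟩ | ⟨h1, _⟩ <;> rw [h1] <;> omega

theorem pv_dicts_eq (k : Int) :
    ((PySem.List.pyRange 0 (k+1) 1).foldl (fun rules i =>
      (PySem.List.pyRange 0 (k+1) 1).foldl (fun rules j =>
        (PySem.List.pyRange 0 (k+1) 1).foldl (fun rules m =>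
          if |i - j| ≤ m ∧ m ≤ min (i + j) (2 * k - i - j) ∧ PySem.Int.mod (i + j + m) 2 = 0
          then rules.insert (i, j, m) 1 else rules) rules) rules)
      (PySem.Dict.empty : PySem.Dict (Int × Int × Int) Int))
    = PySem.Dict.ofList
        ((PySem.List.pyRange 0 (k + 1) 1).flatMap (fun i =>
          (PySem.List.pyRange 0 (k + 1) 1).flatMap (fun j =>
            (PySem.List.pyRange (|i - j|) (min (i + j) (2 * k - i - j) + 1) 2).map
              (fun m => ((i, j, m), (1 : Int)))))) := by
  rw [pv_ofList_eq_foldl]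
  simp only [pv_foldl_insert_if (fun m => _ ∧ _ ∧ _) _ (1 : Int),
    pv_foldl_foldl_flatMap]
  congr 1
  refine List.flatMap_congr (fun i _ => List.flatMap_congr (fun j _ => ?_))
  rw [pv_filter_eq_pyRange_two k i j]

-- ===== VERDICT (by name: the statement is the Claim_ definition above) =====
theorem sl2_fusion_rules_explicit_spec : Claim_equal_sl2_fusion_rules_explicit := by
  intro k _
  exact congrArg (fun d : PySem.Dict (Int × Int × Int) Int =>
    d.items.map (fun p => (p.1.1, p.1.2.1, p.1.2.2, p.2))) (pv_dicts_eq k)
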